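-- pv_equiv track=rewrite | github.com/frichard322/crypto-labs | communication-clients/utils/blum_blum_shub.py | blum_blum_shub
-- ===== SOURCE A (Python) =====
-- def blum_blum_shub(seed: int, length: int) -> str:
-- 	p = 30000000091
-- 	q = 40000000003
-- 	M = p * q
--
-- 	key = []
--
-- 	x = seed
-- 	for _ in range(length):
-- 		byte = 0
-- 		for steps in range(8):
-- 			x = x**2 % M
-- 			byte += x % 2
-- 			if int(steps) != 7:
-- 				byte = byte << 1
-- 		key.append(chr(byte))
--
-- 	return "".join(key)
-- ===== SOURCE B (Python) =====
-- def blum_blum_shub(seed: int, length: int) -> str: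
-- 	M = 30000000091 * 40000000003
-- 	bits = []
-- 	x = seed
-- 	for _ in range(8 * length):
-- 		x = x * x % M
-- 		bits.append(x % 2)
-- 	chars = []
-- 	for i in range(length):
-- 		byte = 0
-- 		for b in bits[i * 8:i * 8 + 8]:
-- 			byte = byte * 2 + b
-- 		chars.append(chr(byte))
-- 	return "".join(chars)
-- ===== Notes on version B (the rewrite author's own statement) =====
-- stated objective: alternative
-- what changed: B replaces A's nested per-character loop (8 squaring steps with shift-accumulation per char) by two separate flat passes: one pass generating the whole 8*length parity-bit stream, then a second pass slicing it into 8-bit groups folded MSB-first (byte = byte*2 + bit) into characters.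
import Mathlib
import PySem

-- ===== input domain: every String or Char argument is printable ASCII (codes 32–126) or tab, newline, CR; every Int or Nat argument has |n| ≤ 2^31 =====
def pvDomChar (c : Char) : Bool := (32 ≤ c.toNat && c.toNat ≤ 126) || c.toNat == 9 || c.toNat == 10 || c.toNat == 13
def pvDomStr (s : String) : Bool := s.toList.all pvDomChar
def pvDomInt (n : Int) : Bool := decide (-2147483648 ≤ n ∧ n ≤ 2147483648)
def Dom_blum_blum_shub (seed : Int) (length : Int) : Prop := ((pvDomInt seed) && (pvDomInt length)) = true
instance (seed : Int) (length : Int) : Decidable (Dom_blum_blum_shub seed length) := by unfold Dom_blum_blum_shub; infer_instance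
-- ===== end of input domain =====

-- B separates bit-stream generation from byte assembly: one flat pass producing the
-- 8*length parity bits, then a second pass grouping each 8-bit slice MSB-first into a
-- character (objective: alternative decomposition, same cost).

-- ===== PORT A =====
-- nested loops: per character, 8 squaring steps accumulating the byte with shifts
def blum_blum_shub (seed : Int) (length : Int) : String :=
  let M : Int := 30000000091 * 40000000003
  let r := (PySem.List.pyRange 0 length 1).foldl
    (fun (st : List Char × Int) _ =>
      let inner := (PySem.List.pyRange 0 8 1).foldl
        (fun (st2 : Int × Int) steps =>
          let x := PySem.Int.mod (st2.2 ^ 2) M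
          let byte := st2.1 + PySem.Int.mod x 2
          let byte := if steps ≠ 7 then byte <<< (1 : Nat) else byte
          (byte, x)) (0, st.2)
      (st.1 ++ [Char.ofNat inner.1.toNat], inner.2)) ([], seed)
  String.mk r.1

-- ===== PORT B =====
-- pass 1: the flat bit stream; pass 2: group 8-bit slices into characters
def blum_blum_shub_alt (seed : Int) (length : Int) : String :=
  let M : Int := 30000000091 * 40000000003
  let bits := ((PySem.List.pyRange 0 (8 * length) 1).foldl
    (fun (st : List Int × Int) _ =>
      let x := PySem.Int.mod (st.2 * st.2) M
      (st.1 ++ [PySem.Int.mod x 2], x)) ([], seed)).1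
  let chars := (PySem.List.pyRange 0 length 1).foldl
    (fun (acc : List Char) i =>
      let byte := (PySem.List.slice bits (some (i * 8)) (some (i * 8 + 8))).foldl
        (fun b bit => b * 2 + bit) (0 : Int)
      acc ++ [Char.ofNat byte.toNat]) []
  String.mk chars

-- ===== PRECONDITION & SPEC =====
def Spec_blum_blum_shub (seed : Int) (length : Int) (out : String) : Prop := out = blum_blum_shub_alt seed length
instance (seed : Int) (length : Int) (out : String) : Decidable (Spec_blum_blum_shub seed length out) := by unfold Spec_blum_blum_shub; infer_instance

-- ===== CLAIM (what is proved, stated in full; the proofs are below) =====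
def Claim_equal_blum_blum_shub : Prop := ∀ (seed : Int) (length : Int), Dom_blum_blum_shub seed length → Spec_blum_blum_shub seed length (blum_blum_shub seed length)


-- ===== LEMMAS AND PROOFS =====

-- the squaring step shared by both ports, its iterates, the trajectory and parities
def bbsStep (x : Int) : Int := PySem.Int.mod (x * x) (30000000091 * 40000000003)
def bbsIter (x : Int) : Nat → Int
  | 0 => x
  | n + 1 => bbsIter (bbsStep x) n
def bbsTraj (x : Int) : Nat → List Int
  | 0 => []
  | n + 1 => bbsStep x :: bbsTraj (bbsStep x) n
def bbsPar (y : Int) : Int := PySem.Int.mod y 2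
-- the byte produced from state x by eight steps, MSB first
def bbsByte (x : Int) : Int :=
  (bbsTraj x 8).foldl (fun b y => b * 2 + bbsPar y) 0
-- A's per-character structure
def bbsKey (x : Int) : Nat → List Char
  | 0 => []
  | n + 1 => Char.ofNat (bbsByte x).toNat :: bbsKey (bbsIter x 8) n
-- the two loop bodies as step functions on the state
def bbsStepB (st : List Int × Int) : List Int × Int :=
  (st.1 ++ [bbsPar (bbsStep st.2)], bbsStep st.2)
def bbsStepA (st : List Char × Int) : List Char × Int :=
  (st.1 ++ [Char.ofNat (bbsByte st.2).toNat], bbsIter st.2 8)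

theorem foldl_ignore {α β : Type} (g : β → β) (init : β) (l : List α) :
    l.foldl (fun s _ => g s) init = g^[l.length] init := by
  induction l generalizing init with
  | nil => rfl
  | cons a t ih => simp [List.foldl_cons, ih, Function.iterate_succ_apply]

theorem bbsIter_add (x : Int) (a b : Nat) : bbsIter x (a + b) = bbsIter (bbsIter x a) b := by
  induction a generalizing x with
  | zero => simp [bbsIter]
  | succ a ih => rw [Nat.succ_add]; simp only [bbsIter]; exact ih (bbsStep x)

theorem bbsTraj_append (x : Int) (a b : Nat) :
    bbsTraj x (a + b) = bbsTraj x a ++ bbsTraj (bbsIter x a) b := by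
  induction a generalizing x with
  | zero => simp [bbsTraj, bbsIter]
  | succ a ih =>
    rw [Nat.succ_add]
    simp only [bbsTraj, List.cons_append]
    rw [ih (bbsStep x)]
    rfl

theorem bbsTraj_length (x : Int) (n : Nat) : (bbsTraj x n).length = n := by
  induction n generalizing x with
  | zero => rfl
  | succ n ih => simp [bbsTraj, ih]

-- A's inner 8-step loop computes (bbsByte x, bbsIter x 8)
theorem inner8 (x : Int) :
    (PySem.List.pyRange 0 8 1).foldl
      (fun (st2 : Int × Int) steps =>
        let x := PySem.Int.mod (st2.2 ^ 2) ((30000000091 : Int) * 40000000003)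
        let byte := st2.1 + PySem.Int.mod x 2
        let byte := if steps ≠ 7 then byte <<< (1 : Nat) else byte
        (byte, x)) (0, x)
    = (bbsByte x, bbsIter x 8) := by
  rw [show PySem.List.pyRange 0 8 1 = [0,1,2,3,4,5,6,7] from by decide]
  simp only [List.foldl_cons, List.foldl_nil, bbsByte, bbsTraj, bbsIter, bbsStep, bbsPar,
    Int.shiftLeft_eq, pow_two]
  norm_num

theorem stepB_iterate (m : Nat) (l : List Int) (x : Int) :
    bbsStepB^[m] (l, x) = (l ++ (bbsTraj x m).map bbsPar, bbsIter x m) := by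
  induction m generalizing l x with
  | zero => simp [bbsIter, bbsTraj]
  | succ m ih =>
    rw [Function.iterate_succ_apply]
    show bbsStepB^[m] (l ++ [bbsPar (bbsStep x)], bbsStep x) = _
    rw [ih]
    simp [bbsTraj, bbsIter]

theorem stepA_iterate (n : Nat) (l : List Char) (x : Int) :
    bbsStepA^[n] (l, x) = (l ++ bbsKey x n, bbsIter x (8 * n)) := by
  induction n generalizing l x with
  | zero => simp [bbsIter, bbsKey]
  | succ n ih =>
    rw [Function.iterate_succ_apply]
    show bbsStepA^[n] (l ++ [Char.ofNat (bbsByte x).toNat], bbsIter x 8) = _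
    rw [ih, ← bbsIter_add]
    rw [show 8 + 8 * n = 8 * (n + 1) from by omega]
    simp [bbsKey]

-- the slice of the bit stream for character k is the parity of the k-th 8-step block
theorem slice_block (x : Int) (n k : Nat) (hk : k < n) :
    PySem.List.slice ((bbsTraj x (8 * n)).map bbsPar)
      (some ((k : Int) * 8)) (some ((k : Int) * 8 + 8))
    = (bbsTraj (bbsIter x (8 * k)) 8).map bbsPar := by
  have h1 : ((k : Int) * 8) = ((8 * k : Nat) : Int) := by push_cast; ring
  have h2 : ((k : Int) * 8 + 8) = ((8 * k : Nat) : Int) + ((8 : Nat) : Int) := by push_cast; ring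
  rw [h1, show ((8 * k : Nat) : Int) + 8 = ((8 * k : Nat) : Int) + ((8 : Nat) : Int) from by norm_num,
     PySem.List.slice_natCast_add]
  have hsplit : 8 * n = 8 * k + (8 + (8 * n - 8 * k - 8)) := by omega
  rw [hsplit, bbsTraj_append, bbsTraj_append]
  rw [← List.map_drop, ← List.map_take]
  rw [List.drop_append_of_le_length (by simp [bbsTraj_length])]
  rw [List.drop_eq_nil_of_le (by simp [bbsTraj_length]), List.nil_append]
  rw [List.take_append_of_le_length (by simp [bbsTraj_length])]
  rw [List.take_of_length_le (by simp [bbsTraj_length])]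

-- bbsKey as a map over the block indices
theorem bbsKey_eq_map (x : Int) (n : Nat) :
    bbsKey x n = (List.range n).map
      (fun k => Char.ofNat (bbsByte (bbsIter x (8 * k))).toNat) := by
  induction n generalizing x with
  | zero => rfl
  | succ n ih =>
    rw [List.range_succ_eq_map]
    simp only [bbsKey, List.map_cons, List.map_map]
    congr 1
    rw [ih]
    apply List.map_congr_left
    intro k hk
    simp only [Function.comp_apply]
    rw [show 8 * (k + 1) = 8 + 8 * k from by omega, bbsIter_add]

-- each port equals the common normal form String.mk (bbsKey seed length.toNat)
theorem portA_eq (seed length : Int) :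
    blum_blum_shub seed length = String.mk (bbsKey seed length.toNat) := by
  unfold blum_blum_shub
  simp only []
  rw [show (fun (st : List Char × Int) (_ : Int) =>
        let inner := (PySem.List.pyRange 0 8 1).foldl
          (fun (st2 : Int × Int) steps =>
            let x := PySem.Int.mod (st2.2 ^ 2) ((30000000091 : Int) * 40000000003)
            let byte := st2.1 + PySem.Int.mod x 2
            let byte := if steps ≠ 7 then byte <<< (1 : Nat) else byte
            (byte, x)) (0, st.2)
        (st.1 ++ [Char.ofNat inner.1.toNat], inner.2))
      = (fun st _ => bbsStepA st) from by
        funext st u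
        simp only [inner8, bbsStepA]]
  rw [foldl_ignore, PySem.List.length_pyRange_one, stepA_iterate]
  simp

theorem portB_eq (seed length : Int) :
    blum_blum_shub_alt seed length = String.mk (bbsKey seed length.toNat) := by
  unfold blum_blum_shub_alt
  simp only []
  rw [show (fun (st : List Int × Int) (_ : Int) =>
        let x := PySem.Int.mod (st.2 * st.2) ((30000000091 : Int) * 40000000003)
        (st.1 ++ [PySem.Int.mod x 2], x))
      = (fun st _ => bbsStepB st) from by
        funext st u
        simp only [bbsStepB, bbsStep, bbsPar]]
  rw [foldl_ignore, PySem.List.length_pyRange_one, stepB_iterate]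
  simp only [List.nil_append]
  rw [PySem.List.foldl_append_singleton_eq_map]
  simp only [List.nil_append]
  rw [PySem.List.pyRange_one, List.map_map]
  rw [show (8 * length - 0).toNat = 8 * length.toNat from by omega,
      show (length - 0).toNat = length.toNat from by omega]
  congr 1
  rw [bbsKey_eq_map]
  apply List.map_congr_left
  intro k hk
  simp only [Function.comp_apply, zero_add]
  rw [slice_block seed length.toNat k (List.mem_range.mp hk)]
  rw [List.foldl_map]
  rfl

-- ===== VERDICT (by name: the statement is the Claim_ definition above) =====
theorem blum_blum_shub_spec : Claim_equal_blum_blum_shub := by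
  intro seed length _
  unfold Spec_blum_blum_shub
  rw [portA_eq, portB_eq]
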